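-- pv_equiv track=rewrite | github.com/artmukr/homework_23 | homework_23.2.py | copy_string
-- ===== SOURCE A (Python) =====
-- def copy_string(string: str) -> str:
--     string_copy = ''
--     i = 0
--     while i < len(string):
--         string_copy += string[i]
--         i += 1
--     else:
--         return string_copy
-- ===== SOURCE B (Python) =====
-- def copy_string(string: str) -> str:
--     return string
-- ===== Notes on version B (the rewrite author's own statement) =====
-- stated objective: simpler
-- what changed: Replaces the index loop with quadratic string concatenation by a closed form: since str is immutable, returning the string itself yields the same value.
import Mathlib
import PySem

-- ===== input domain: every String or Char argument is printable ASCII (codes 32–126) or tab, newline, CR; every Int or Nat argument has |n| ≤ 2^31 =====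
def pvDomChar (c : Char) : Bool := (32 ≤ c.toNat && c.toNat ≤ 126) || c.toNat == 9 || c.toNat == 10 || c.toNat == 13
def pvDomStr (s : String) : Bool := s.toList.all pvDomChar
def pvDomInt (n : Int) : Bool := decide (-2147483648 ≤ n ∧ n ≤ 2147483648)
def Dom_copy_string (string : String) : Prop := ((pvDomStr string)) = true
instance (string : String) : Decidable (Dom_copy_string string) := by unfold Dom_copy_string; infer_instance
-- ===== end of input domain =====

-- B drops A's quadratic index loop: str is immutable, so returning the string itself is the same value.

-- ===== PORT A =====
-- A walks indices 0..len-1, appending string[i] to an accumulator one char at a time;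
-- ported as the same left-to-right char-by-char accumulation over the string's chars.
def copy_string (string : String) : String :=
  String.ofList (string.toList.foldl (fun acc c => acc ++ [c]) [])

-- ===== PORT B =====
def copy_string_alt (string : String) : String := string

-- ===== PRECONDITION & SPEC =====
def Spec_copy_string (string : String) (out : String) : Prop := out = copy_string_alt string
instance (string : String) (out : String) : Decidable (Spec_copy_string string out) := by unfold Spec_copy_string; infer_instance

-- ===== CLAIM (what is proved, stated in full; the proofs are below) =====
def Claim_equal_copy_string : Prop := ∀ (string : String), Dom_copy_string string → Spec_copy_string string (copy_string string)

-- ===== LEMMAS AND PROOFS =====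
theorem copy_foldl_append (l acc : List Char) :
    l.foldl (fun a c => a ++ [c]) acc = acc ++ l := by
  induction l generalizing acc with
  | nil => simp
  | cons c t ih => simp [List.foldl, ih]

-- ===== VERDICT (by name: the statement is the Claim_ definition above) =====
theorem copy_string_spec : Claim_equal_copy_string := by
  intro string _
  show copy_string string = copy_string_alt string
  rw [copy_string, copy_string_alt, copy_foldl_append, List.nil_append]
  exact string.ofList_toList
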